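-- pv_equiv track=rewrite | github.com/Hugodjj/TEP | Semana 1/Problema E.py | totcount
-- ===== SOURCE A (Python) =====
-- def totcount(s, t):
--     count = 0
--     l = len(s)
--
--     while s and t:
--         if s[-1] == t[-1]:
--             t = t[:-1]
--         else:
--             count += 1
--         s = s[:-1]
--
--     if not t:
--         return count
--     return l
-- ===== SOURCE B (Python) =====
-- def totcount(s, t):
--     count = 0
--     i, j = len(s) - 1, len(t) - 1
--     while i >= 0 and j >= 0:
--         if s[i] == t[j]:
--             j -= 1
--         else:
--             count += 1
--         i -= 1
--     return count if j < 0 else len(s)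
-- ===== Notes on version B (the rewrite author's own statement) =====
-- stated objective: faster
-- what changed: Two integer index pointers walk s and t from the right in place of A's repeated slice copies s[:-1]/t[:-1], turning each O(n) slice per iteration into O(1) pointer arithmetic.
import Mathlib
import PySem

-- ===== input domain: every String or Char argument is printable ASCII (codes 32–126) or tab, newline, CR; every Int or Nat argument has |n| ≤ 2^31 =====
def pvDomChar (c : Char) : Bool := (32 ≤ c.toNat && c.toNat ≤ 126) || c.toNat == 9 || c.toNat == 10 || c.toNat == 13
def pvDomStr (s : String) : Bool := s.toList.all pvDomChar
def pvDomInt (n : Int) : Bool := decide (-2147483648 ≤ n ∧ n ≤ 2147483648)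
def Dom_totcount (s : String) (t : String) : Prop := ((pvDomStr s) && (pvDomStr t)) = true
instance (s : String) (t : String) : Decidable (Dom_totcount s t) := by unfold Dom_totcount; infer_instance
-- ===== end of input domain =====

-- B replaces A's per-iteration slice copies s[:-1]/t[:-1] with two index pointers moving left; same return value, O(n) instead of O(n^2).

-- ===== PORT A =====
-- A's while loop: state (s, t, count); each step compares last chars, slices.
def totA (s t : List Char) (count l : Int) : Int :=
  if h : s ≠ [] ∧ t ≠ [] then
    if PySem.List.pyGet? s (-1) = PySem.List.pyGet? t (-1) then
      totA s.dropLast t.dropLast count l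
    else
      totA s.dropLast t (count + 1) l
  else
    if t = [] then count else l
termination_by s.length
decreasing_by
  all_goals
    have := List.length_pos_of_ne_nil h.1
    simp only [List.length_dropLast]
    omega

def totcount (s : String) (t : String) : Int :=
  totA s.toList t.toList 0 (PySem.Str.len s)

-- ===== PORT B =====
-- B's while loop: state (i, j, count); indices into the unchanged strings.
def loopB (sL tL : List Char) (l i j count : Int) : Int :=
  if h : 0 ≤ i ∧ 0 ≤ j then
    if PySem.List.pyGet? sL i = PySem.List.pyGet? tL j then
      loopB sL tL l (i - 1) (j - 1) count
    else
      loopB sL tL l (i - 1) j (count + 1)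
  else
    if j < 0 then count else l
termination_by (i + 1).toNat
decreasing_by all_goals omega

def totcount_alt (s : String) (t : String) : Int :=
  loopB s.toList t.toList (PySem.Str.len s) (PySem.Str.len s - 1) (PySem.Str.len t - 1) 0

-- ===== PRECONDITION & SPEC =====
def Spec_totcount (s : String) (t : String) (out : Int) : Prop := out = totcount_alt s t
instance (s : String) (t : String) (out : Int) : Decidable (Spec_totcount s t out) := by unfold Spec_totcount; infer_instance

-- ===== CLAIM (what is proved, stated in full; the proofs are below) =====
def Claim_equal_totcount : Prop := ∀ (s : String) (t : String), Dom_totcount s t → Spec_totcount s t (totcount s t)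

-- ===== LEMMAS AND PROOFS =====

lemma take_succ_dropLast {α : Type} (l : List α) (n : Nat) (h : n < l.length) :
    (l.take (n + 1)).dropLast = l.take n := by
  by_cases h2 : n + 1 < l.length
  · rw [List.dropLast_take h2]
    congr 1
  · have hl : l.take (n + 1) = l := List.take_of_length_le (by omega)
    rw [hl, List.dropLast_eq_take]
    congr 1
    omega

lemma take_succ_getLast? {α : Type} (l : List α) (n : Nat) (h : n < l.length) :
    (l.take (n + 1)).getLast? = some l[n] := by
  rw [List.take_add_one, List.getElem?_eq_getElem h]
  exact List.getLast?_concat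

lemma take_succ_ne_nil {α : Type} (l : List α) (n : Nat) (h : n < l.length) :
    l.take (n + 1) ≠ [] := by
  apply List.ne_nil_of_length_pos
  simp only [List.length_take]
  omega

lemma loopB_eq_totA (s' t' : List Char) (l i j c : Int)
    (hi : i < (s'.length : Int)) (hj : j < (t'.length : Int)) :
    loopB s' t' l i j c = totA (s'.take (i + 1).toNat) (t'.take (j + 1).toNat) c l := by
  suffices H : ∀ (n : Nat) (i j c : Int), (i + 1).toNat = n → i < (s'.length : Int) →
      j < (t'.length : Int) →
      loopB s' t' l i j c = totA (s'.take (i + 1).toNat) (t'.take (j + 1).toNat) c l from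
    H _ i j c rfl hi hj
  intro n
  induction n using Nat.strong_induction_on with
  | _ n ih =>
    intro i j c hn hi hj
    rw [loopB.eq_def, totA.eq_def]
    by_cases hij : 0 ≤ i ∧ 0 ≤ j
    · obtain ⟨hi0, hj0⟩ := hij
      have hiN : i.toNat < s'.length := by omega
      have hjN : j.toNat < t'.length := by omega
      have hsi : (i + 1).toNat = i.toNat + 1 := by omega
      have hsj : (j + 1).toNat = j.toNat + 1 := by omega
      simp only [hsi, hsj]
      have hsne := take_succ_ne_nil s' i.toNat hiN
      have htne := take_succ_ne_nil t' j.toNat hjN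
      rw [dif_pos ⟨hi0, hj0⟩, dif_pos ⟨hsne, htne⟩]
      have hA : PySem.List.pyGet? s' i = some s'[i.toNat] := by
        rw [PySem.List.pyGet?_of_nonneg _ hi0, List.getElem?_eq_getElem hiN]
      have hB : PySem.List.pyGet? t' j = some t'[j.toNat] := by
        rw [PySem.List.pyGet?_of_nonneg _ hj0, List.getElem?_eq_getElem hjN]
      have hA' : PySem.List.pyGet? (s'.take (i.toNat + 1)) (-1) = some s'[i.toNat] := by
        rw [PySem.List.pyGet?_neg_one, take_succ_getLast? s' i.toNat hiN]
      have hB' : PySem.List.pyGet? (t'.take (j.toNat + 1)) (-1) = some t'[j.toNat] := by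
        rw [PySem.List.pyGet?_neg_one, take_succ_getLast? t' j.toNat hjN]
      rw [hA, hB, hA', hB']
      by_cases heq : s'[i.toNat] = t'[j.toNat]
      · rw [heq, if_pos rfl, if_pos rfl,
          take_succ_dropLast s' i.toNat hiN, take_succ_dropLast t' j.toNat hjN]
        have e1 : ((i - 1) + 1).toNat = i.toNat := by omega
        have e2 : ((j - 1) + 1).toNat = j.toNat := by omega
        have := ih i.toNat (by omega) (i - 1) (j - 1) c (by omega) (by omega) (by omega)
        rw [e1, e2] at this
        exact this
      · have hne : ¬ (some s'[i.toNat] = some t'[j.toNat]) := by simpa using heq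
        rw [if_neg hne, if_neg hne, take_succ_dropLast s' i.toNat hiN]
        have e1 : ((i - 1) + 1).toNat = i.toNat := by omega
        have := ih i.toNat (by omega) (i - 1) j (c + 1) (by omega) (by omega) hj
        rw [e1, hsj] at this
        exact this
    · rw [dif_neg hij]
      by_cases hjneg : j < 0
      · rw [if_pos hjneg]
        have hz : (j + 1).toNat = 0 := by omega
        rw [hz]
        simp only [List.take_zero]
        simp
      · have hineg : i < 0 := by omega
        rw [if_neg hjneg]
        have hz : (i + 1).toNat = 0 := by omega
        rw [hz]
        simp only [List.take_zero]
        have hjN : j.toNat < t'.length := by omega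
        have hsj : (j + 1).toNat = j.toNat + 1 := by omega
        rw [hsj, dif_neg (by simp), if_neg (take_succ_ne_nil t' j.toNat hjN)]

-- ===== VERDICT (by name: the statement is the Claim_ definition above) =====
theorem totcount_spec : Claim_equal_totcount := by
  intro s t _
  unfold Spec_totcount totcount totcount_alt
  rw [PySem.Str.len_eq s, PySem.Str.len_eq t,
    loopB_eq_totA s.toList t.toList _ _ _ 0 (by omega) (by omega)]
  have e1 : ((s.toList.length : Int) - 1 + 1).toNat = s.toList.length := by omega
  have e2 : ((t.toList.length : Int) - 1 + 1).toNat = t.toList.length := by omega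
  rw [e1, e2, List.take_length, List.take_length]
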